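-- pv_equiv track=rewrite | github.com/TropicalTeamYard/Server_Django | user/utils.py | check_md5
-- ===== SOURCE A (Python) =====
-- def check_md5(value: str):
--     if len(value) != 32:
--         return False
--     else:
--         for _c in value:
--             if('0' <= _c <= '9') or ('a' <= _c <= 'f'):
--                 pass
--             else:
--                 return False
--         return True
-- ===== SOURCE B (Python) =====
-- def check_md5(value: str):
--     if len(value) != 32:
--         return False
--     try:
--         n = int(value, 16)
--     except ValueError:
--         return False
--     return n >= 0 and format(n, "032x") == value
-- ===== Notes on version B (the rewrite author's own statement) =====
-- stated objective: alternative
-- what changed: Replaces the per-character classification loop with a numeric round-trip: parse the string as a base-16 integer and accept iff re-formatting that integer as 32-digit zero-padded lowercase hex reproduces the input exactly.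
import Mathlib
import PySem

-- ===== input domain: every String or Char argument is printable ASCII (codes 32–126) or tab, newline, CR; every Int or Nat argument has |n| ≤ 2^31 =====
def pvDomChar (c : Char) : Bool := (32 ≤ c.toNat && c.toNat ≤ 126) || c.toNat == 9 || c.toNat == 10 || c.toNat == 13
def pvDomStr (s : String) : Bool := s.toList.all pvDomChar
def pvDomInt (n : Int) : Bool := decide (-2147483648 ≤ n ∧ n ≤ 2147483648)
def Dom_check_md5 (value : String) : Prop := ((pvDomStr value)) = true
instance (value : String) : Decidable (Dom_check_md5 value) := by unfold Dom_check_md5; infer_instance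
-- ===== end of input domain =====

-- B replaces A's per-character classification loop with a numeric round-trip: parse the
-- string as a base-16 integer and accept iff re-formatting it as 32-digit zero-padded
-- lowercase hex reproduces the input (alternative algorithm, same cost).

-- ===== PORT A =====
-- A's for-loop with early 'return False', transcribed as structural recursion.
def chkA : List Char → Bool
  | [] => true
  | c :: rest => if (('0' ≤ c && c ≤ '9') || ('a' ≤ c && c ≤ 'f')) then chkA rest else false

def check_md5 (value : String) : Bool :=
  if value.toList.length ≠ 32 then false else chkA value.toList

-- ===== PORT B =====
-- Hand port of Python's int(value, 16) on the printable-ASCII domain (PySem has no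
-- base-16 parser): strip ASCII whitespace, optional sign, optional 0x/0X prefix,
-- hex digits with single underscores between digits; none exactly where Python
-- raises ValueError. Exact on Dom (whitespace there is ' ', '\t', '\n', '\r').
def pvIsSpace (c : Char) : Bool := c == ' ' || c == '\t' || c == '\n' || c == '\r'

def isHexDig (c : Char) : Bool :=
  ('0' ≤ c && c ≤ '9') || ('a' ≤ c && c ≤ 'f') || ('A' ≤ c && c ≤ 'F')

def hexVal (c : Char) : Nat :=
  if c ≤ '9' then c.toNat - 48 else if c ≤ 'F' then c.toNat - 55 else c.toNat - 87

def parseHexTail (acc : Nat) : List Char → Option Nat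
  | [] => some acc
  | c :: rest =>
    if c = '_' then
      match rest with
      | [] => none
      | c2 :: rest2 => if isHexDig c2 then parseHexTail (16 * acc + hexVal c2) rest2 else none
    else if isHexDig c then parseHexTail (16 * acc + hexVal c) rest
    else none

def parseStart : List Char → Option Nat
  | [] => none
  | c :: rest => if isHexDig c then parseHexTail (hexVal c) rest else none

def parseAfterPrefix : List Char → Option Nat
  | [] => none
  | c :: rest => if c = '_' then parseStart rest else parseStart (c :: rest)

def parseBody : List Char → Option Nat
  | [] => none
  | [c] => if isHexDig c then some (hexVal c) else none
  | c :: x :: rest =>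
    if c = '0' ∧ (x = 'x' ∨ x = 'X') then parseAfterPrefix rest
    else if isHexDig c then parseHexTail (hexVal c) (x :: rest)
    else none

def stripWS (cs : List Char) : List Char :=
  ((cs.dropWhile pvIsSpace).reverse.dropWhile pvIsSpace).reverse

def parseHex (s : String) : Option Int :=
  match stripWS s.toList with
  | [] => none
  | c :: rest =>
    if c = '+' then (parseBody rest).map (fun m => (m : Int))
    else if c = '-' then (parseBody rest).map (fun m => -(m : Int))
    else (parseBody (c :: rest)).map (fun m => (m : Int))

-- Hand port of format(n, "032x") for n ≥ 0 (the only case B reaches it).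
def hexChar (d : Nat) : Char := if d < 10 then Char.ofNat (48 + d) else Char.ofNat (87 + d)

def toHexRev (n : Nat) : List Char :=
  if h : n = 0 then [] else hexChar (n % 16) :: toHexRev (n / 16)
termination_by n
decreasing_by exact Nat.div_lt_self (Nat.pos_of_ne_zero h) (by norm_num)

def formatHex32 (n : Nat) : List Char :=
  let ds := if n = 0 then ['0'] else (toHexRev n).reverse
  List.replicate (32 - ds.length) '0' ++ ds

def check_md5_alt (value : String) : Bool :=
  if value.toList.length ≠ 32 then false
  else
    match parseHex value with
    | none => false
    | some n => decide (0 ≤ n) && (formatHex32 n.toNat == value.toList)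

-- ===== PRECONDITION & SPEC =====
def Spec_check_md5 (value : String) (out : Bool) : Prop := out = check_md5_alt value
instance (value : String) (out : Bool) : Decidable (Spec_check_md5 value out) := by unfold Spec_check_md5; infer_instance

-- ===== CLAIM (what is proved, stated in full; the proofs are below) =====
def Claim_equal_check_md5 : Prop := ∀ (value : String), Dom_check_md5 value → Spec_check_md5 value (check_md5 value)

-- ===== LEMMAS AND PROOFS =====
def isLowHex (c : Char) : Bool := ('0' ≤ c && c ≤ '9') || ('a' ≤ c && c ≤ 'f')

def hval (cs : List Char) : Nat := cs.foldl (fun a c => 16 * a + hexVal c) 0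

theorem chkA_eq_all (cs : List Char) : chkA cs = cs.all isLowHex := by
  induction cs with
  | nil => rfl
  | cons c rest ih =>
    simp only [chkA, List.all_cons, isLowHex, ih]
    by_cases h : (('0' ≤ c && c ≤ '9') || ('a' ≤ c && c ≤ 'f')) = true
    · simp [h]
    · simp only [Bool.not_eq_true] at h; simp [h]

theorem lowhex_mem (c : Char) (h : isLowHex c = true) :
    c ∈ ['0','1','2','3','4','5','6','7','8','9','a','b','c','d','e','f'] := by
  simp only [isLowHex, Bool.or_eq_true, Bool.and_eq_true, decide_eq_true_eq,
    Char.le_def, UInt32.le_iff_toNat_le] at h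
  simp only [List.mem_cons, List.not_mem_nil, or_false, Char.ext_iff, ← UInt32.toNat_inj]
  have h0 : '0'.val.toNat = 48 := rfl
  have h9 : '9'.val.toNat = 57 := rfl
  have ha : 'a'.val.toNat = 97 := rfl
  have hf : 'f'.val.toNat = 102 := rfl
  rw [h0, h9, ha, hf] at h
  have e0 : '0'.val.toNat = 48 := rfl
  have e1 : '1'.val.toNat = 49 := rfl
  have e2 : '2'.val.toNat = 50 := rfl
  have e3 : '3'.val.toNat = 51 := rfl
  have e4 : '4'.val.toNat = 52 := rfl
  have e5 : '5'.val.toNat = 53 := rfl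
  have e6 : '6'.val.toNat = 54 := rfl
  have e7 : '7'.val.toNat = 55 := rfl
  have e8 : '8'.val.toNat = 56 := rfl
  have e9 : '9'.val.toNat = 57 := rfl
  have ea : 'a'.val.toNat = 97 := rfl
  have eb : 'b'.val.toNat = 98 := rfl
  have ec : 'c'.val.toNat = 99 := rfl
  have ed : 'd'.val.toNat = 100 := rfl
  have ee : 'e'.val.toNat = 101 := rfl
  have ef : 'f'.val.toNat = 102 := rfl
  rw [e0, e1, e2, e3, e4, e5, e6, e7, e8, e9, ea, eb, ec, ed, ee, ef]
  omega

-- the per-character facts the proofs need, by enumeration of the 16 lowercase hex chars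
theorem lowhex_facts (c : Char) (h : isLowHex c = true) :
    isHexDig c = true ∧ pvIsSpace c = false ∧ c ≠ '_' ∧ c ≠ '+' ∧ c ≠ '-' ∧
    c ≠ 'x' ∧ c ≠ 'X' ∧ hexVal c < 16 ∧ hexChar (hexVal c) = c ∧
    (hexVal c = 0 ↔ c = '0') := by
  have := lowhex_mem c h
  fin_cases this <;> exact (by decide)

theorem hexChar_lowhex (d : Nat) (h : d < 16) : isLowHex (hexChar d) = true := by
  interval_cases d <;> decide

theorem dropWhile_of_all_false {p : Char → Bool} (cs : List Char)
    (h : ∀ c ∈ cs, p c = false) : cs.dropWhile p = cs := by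
  cases cs with
  | nil => rfl
  | cons a l => simp [h a (by simp)]

theorem stripWS_of_lowhex (cs : List Char) (h : cs.all isLowHex = true) :
    stripWS cs = cs := by
  have hns : ∀ c ∈ cs, pvIsSpace c = false := by
    intro c hc
    exact (lowhex_facts c (by simpa using (List.all_eq_true.mp h c hc))).2.1
  unfold stripWS
  rw [dropWhile_of_all_false cs hns,
    dropWhile_of_all_false _ (by intro c hc; exact hns c (by simpa using hc)),
    List.reverse_reverse]

theorem parseHexTail_all (a : Nat) (cs : List Char) (h : cs.all isLowHex = true) :
    parseHexTail a cs = some (cs.foldl (fun a c => 16 * a + hexVal c) a) := by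
  induction cs generalizing a with
  | nil => rfl
  | cons c rest ih =>
    simp only [List.all_cons, Bool.and_eq_true] at h
    obtain ⟨f1, _, f3, _⟩ := lowhex_facts c h.1
    rw [parseHexTail.eq_def]
    simp only []
    rw [if_neg f3, if_pos f1, ih _ h.2]
    rfl

theorem hval_append (t : List Char) (d : Char) :
    hval (t ++ [d]) = 16 * hval t + hexVal d := by
  simp [hval, List.foldl_append]

theorem hval_zero_iff (t : List Char) (h : t.all isLowHex = true) :
    hval t = 0 ↔ ∀ c ∈ t, c = '0' := by
  induction t using List.reverseRecOn with
  | nil => simp [hval]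
  | append_singleton t d ih =>
    simp only [List.all_append, Bool.and_eq_true, List.all_cons, List.all_nil,
      Bool.and_true] at h
    rw [hval_append]
    have hd0 := (lowhex_facts d h.2).2.2.2.2.2.2.2.2.2
    constructor
    · intro hz c hc
      have h1 : hval t = 0 := by omega
      have h2 : hexVal d = 0 := by omega
      rcases List.mem_append.mp hc with hc | hc
      · exact (ih h.1).mp h1 c hc
      · simp only [List.mem_singleton] at hc; subst hc; exact hd0.mp h2
    · intro hall
      have h1 : hval t = 0 := (ih h.1).mpr fun c hc => hall c (by simp [hc])
      have h2 : hexVal d = 0 := hd0.mpr (hall d (by simp))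
      omega

theorem toHexRev_hval (t : List Char) (h : t.all isLowHex = true) :
    toHexRev (hval t) = (t.dropWhile (fun c => c == '0')).reverse := by
  induction t using List.reverseRecOn with
  | nil => simp [hval, toHexRev]
  | append_singleton t d ih =>
    simp only [List.all_append, Bool.and_eq_true, List.all_cons, List.all_nil,
      Bool.and_true] at h
    obtain ⟨_, _, _, _, _, _, _, hlt, hchar, hd0⟩ := lowhex_facts d h.2
    rw [hval_append]
    by_cases hz : 16 * hval t + hexVal d = 0
    · rw [hz]
      have hallz : ∀ c ∈ t ++ [d], c = '0' := by
        intro c hc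
        rcases List.mem_append.mp hc with hc | hc
        · exact (hval_zero_iff t h.1).mp (by omega) c hc
        · simp only [List.mem_singleton] at hc; subst hc; exact hd0.mp (by omega)
      rw [List.dropWhile_eq_nil_iff.mpr (by intro x hx; simp [hallz x hx])]
      simp [toHexRev]
    · rw [toHexRev, dif_neg hz]
      have hm : (16 * hval t + hexVal d) % 16 = hexVal d := by omega
      have hq : (16 * hval t + hexVal d) / 16 = hval t := by omega
      rw [hm, hq, hchar, ih h.1, List.dropWhile_append]
      by_cases he : t.dropWhile (fun c => c == '0') = []
      · have ht0 : hval t = 0 :=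
          (hval_zero_iff t h.1).mpr (by
            intro c hc
            simpa using List.dropWhile_eq_nil_iff.mp he c hc)
        have hdne : ¬(d == '0') = true := by
          intro hb
          exact hz (by have := hd0.mpr (by simpa using hb); omega)
        simp [he, hdne]
      · simp [he, List.isEmpty_iff]

theorem hval_parse (cs : List Char) (h : cs.all isLowHex = true)
    (hlen : cs.length = 32) :
    parseBody cs = some (hval cs) := by
  match cs, hlen with
  | c0 :: c1 :: rest, _ =>
    simp only [List.all_cons, Bool.and_eq_true] at h
    obtain ⟨f1, _, _, _, _, _, _, _, _, _⟩ := lowhex_facts c0 h.1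
    obtain ⟨_, _, _, _, _, g6, g7, _, _, _⟩ := lowhex_facts c1 h.2.1
    have hnp : ¬(c0 = '0' ∧ (c1 = 'x' ∨ c1 = 'X')) := by
      rintro ⟨_, hx | hx⟩
      · exact g6 hx
      · exact g7 hx
    simp only [parseBody, if_neg hnp, if_pos f1]
    rw [parseHexTail_all _ _ (by simp [h.2.1, h.2.2])]
    simp [hval]

theorem parseHex_lowhex (value : String) (h : value.toList.all isLowHex = true)
    (hlen : value.toList.length = 32) :
    parseHex value = some ((hval value.toList : Nat) : Int) := by
  unfold parseHex
  rw [stripWS_of_lowhex _ h]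
  match hcs : value.toList, hlen with
  | c0 :: rest, _ =>
    rw [hcs] at h
    simp only [List.all_cons, Bool.and_eq_true] at h
    obtain ⟨_, _, _, f4, f5, _, _, _, _, _⟩ := lowhex_facts c0 h.1
    simp only [if_neg f4, if_neg f5]
    rw [hval_parse (c0 :: rest) (by simp [h.1, h.2]) (by simpa [hcs] using hlen)]
    rfl

theorem formatHex32_eq (cs : List Char) (h : cs.all isLowHex = true)
    (hlen : cs.length = 32) : formatHex32 (hval cs) = cs := by
  unfold formatHex32
  by_cases hz : hval cs = 0
  · have hallz : ∀ c ∈ cs, c = '0' := (hval_zero_iff cs h).mp hz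
    have : cs = List.replicate 32 '0' :=
      List.eq_replicate_iff.mpr ⟨hlen, hallz⟩
    rw [this]
    decide
  · simp only [if_neg hz]
    rw [toHexRev_hval cs h, List.reverse_reverse]
    have hsplit := List.takeWhile_append_dropWhile (p := fun c => c == '0') (l := cs)
    have htw : cs.takeWhile (fun c => c == '0') =
        List.replicate (32 - (cs.dropWhile (fun c => c == '0')).length) '0' := by
      apply List.eq_replicate_iff.mpr
      constructor
      · have := congrArg List.length hsplit
        simp only [List.length_append] at this
        omega
      · intro c hc
        simpa using List.mem_takeWhile_imp hc
    calc List.replicate (32 - (cs.dropWhile (fun c => c == '0')).length) '0' ++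
          cs.dropWhile (fun c => c == '0')
        = cs.takeWhile (fun c => c == '0') ++ cs.dropWhile (fun c => c == '0') := by
          rw [htw]
      _ = cs := hsplit

theorem toHexRev_lowhex (n : Nat) : ∀ c ∈ toHexRev n, isLowHex c = true := by
  induction n using Nat.strong_induction_on with
  | _ n ih =>
    intro c hc
    rw [toHexRev] at hc
    by_cases hz : n = 0
    · simp [hz] at hc
    · rw [dif_neg hz] at hc
      rcases List.mem_cons.mp hc with hc | hc
      · subst hc; exact hexChar_lowhex _ (Nat.mod_lt _ (by norm_num))
      · exact ih (n / 16) (Nat.div_lt_self (Nat.pos_of_ne_zero hz) (by norm_num)) c hc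

theorem formatHex32_lowhex (n : Nat) : (formatHex32 n).all isLowHex = true := by
  unfold formatHex32
  simp only [List.all_append, Bool.and_eq_true, List.all_eq_true]
  constructor
  · intro c hc
    have := List.eq_of_mem_replicate hc
    subst this; decide
  · by_cases hz : n = 0
    · intro c hc
      rw [if_pos hz] at hc
      simp only [List.mem_singleton] at hc
      subst hc; decide
    · simp only [if_neg hz]
      intro c hc
      exact toHexRev_lowhex n c (by simpa using hc)

-- ===== VERDICT (by name: the statement is the Claim_ definition above) =====
theorem check_md5_spec : Claim_equal_check_md5 := by
  intro value _
  unfold Spec_check_md5 check_md5 check_md5_alt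
  by_cases hlen : value.toList.length = 32
  · simp only [hlen, ne_eq, not_true_eq_false, if_false]
    by_cases hall : value.toList.all isLowHex = true
    · rw [parseHex_lowhex value hall hlen]
      simp [chkA_eq_all, hall, formatHex32_eq value.toList hall hlen]
    · cases hp : parseHex value with
      | none =>
        simp only [Bool.not_eq_true] at hall
        rw [chkA_eq_all]
        exact hall
      | some n =>
        by_cases h0 : 0 ≤ n
        · have hne : ¬ formatHex32 n.toNat = value.toList := by
            intro he
            exact hall (he ▸ formatHex32_lowhex n.toNat)
          simp only [Bool.not_eq_true] at hall
          rw [chkA_eq_all, hall]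
          have hb : (formatHex32 n.toNat == value.toList) = false :=
            beq_eq_false_iff_ne.mpr hne
          simp [hb]
        · simp only [Bool.not_eq_true] at hall
          rw [chkA_eq_all, hall]
          simp [h0]
  · have h2 : ¬ value.length = 32 := by simpa using hlen
    simp [h2]
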